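-- pv_equiv track=rewrite | github.com/raywted75/Meta-Coding-Puzzles | Level 2/Tunnel Time.py | getSecondsElapsed
-- ===== SOURCE A (Python) =====
-- from typing import List
--
-- def getSecondsElapsed(C: int, N: int, A: List[int], B: List[int], K: int) -> int:
--   # Write your code here
--   A.sort()
--   B.sort()
--
--   one_round_tunnel_time = sum(b - a for a, b in zip(A, B))
--   rounds = K // one_round_tunnel_time
--   remainder = K % one_round_tunnel_time
--
--   if remainder == 0:
--     return B[-1] + (rounds - 1) * C
--
--   for a, b in zip(A, B):
--     remainder -= b - a
--     if remainder <= 0: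
--       return rounds * C + b + remainder
-- ===== SOURCE B (Python) =====
-- from typing import List
--
-- def _search(d, lo, hi, r):
--     """Divide and conquer over d[lo:hi]: returns (segment sum, hit), where hit is
--     (index, cumulative duration from lo through that index) for the FIRST index
--     whose cumulative duration reaches r, or None if no prefix of the segment does."""
--     if hi - lo <= 1:
--         s = d[lo]
--         return s, ((lo, s) if r <= s else None)
--     mid = (lo + hi) // 2
--     ls, lhit = _search(d, lo, mid, r)
--     rs, rhit = _search(d, mid, hi, r - ls)
--     if lhit is not None:
--         return ls + rs, lhit
--     if rhit is not None:
--         i, p = rhit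
--         return ls + rs, (i, ls + p)
--     return ls + rs, None
--
-- def getSecondsElapsed(C: int, N: int, A: List[int], B: List[int], K: int) -> int:
--     A.sort()
--     B.sort()
--     d = [b - a for a, b in zip(A, B)]
--     total = sum(d)
--     rounds, remainder = divmod(K, total)
--     if remainder == 0:
--         return B[-1] + (rounds - 1) * C
--     _, hit = _search(d, 0, len(d), remainder)
--     i, p = hit
--     return rounds * C + B[i] + (remainder - p)
-- ===== Notes on version B (the rewrite author's own statement) =====
-- stated objective: alternative
-- what changed: Replaces A's destructive left-to-right countdown scan over the tunnel pairs by a divide-and-conquer search: each half of the duration list reports (segment sum, first cumulative hit) and the recursion descends to the tunnel where the remainder is first reached.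
-- outside the precondition, e.g. on getSecondsElapsed(10, 1, [0], [-5], -3): A returns None, B raises TypeError
import Mathlib
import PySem

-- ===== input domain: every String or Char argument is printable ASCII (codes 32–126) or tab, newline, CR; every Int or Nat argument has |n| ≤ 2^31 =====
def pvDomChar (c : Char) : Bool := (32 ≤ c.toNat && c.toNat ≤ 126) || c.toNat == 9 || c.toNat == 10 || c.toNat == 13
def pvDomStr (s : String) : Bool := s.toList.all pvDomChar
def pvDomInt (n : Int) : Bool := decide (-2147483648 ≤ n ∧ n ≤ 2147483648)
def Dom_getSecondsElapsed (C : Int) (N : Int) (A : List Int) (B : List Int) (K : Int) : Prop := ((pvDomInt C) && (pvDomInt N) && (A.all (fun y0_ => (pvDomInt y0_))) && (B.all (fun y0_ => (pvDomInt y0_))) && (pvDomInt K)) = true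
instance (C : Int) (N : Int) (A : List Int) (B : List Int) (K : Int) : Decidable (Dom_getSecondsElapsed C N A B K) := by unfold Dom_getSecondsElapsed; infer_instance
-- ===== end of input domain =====

-- B replaces A's destructive left-to-right countdown scan by a divide-and-conquer
-- search returning (segment sum, first cumulative hit) per half (alternative, same cost;
-- both A and B sort the argument lists in place — equivalence is about the return value).


-- ===== PORT A =====
-- the 'for a, b in zip(A, B): remainder -= b - a; if remainder <= 0: return …' loop
-- (0 stands for Python's fall-off-the-end None; Pre_ excludes that)
def pvLoopA (C : Int) (rounds : Int) : List (Int × Int) → Int → Int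
  | [], _ => 0
  | (a, b) :: rest, rem =>
    let rem' := rem - (b - a)
    if rem' ≤ 0 then rounds * C + b + rem' else pvLoopA C rounds rest rem'

def getSecondsElapsed (C : Int) (N : Int) (A : List Int) (B : List Int) (K : Int) : Int :=
  let A' := PySem.List.sorted A (fun x => x) false
  let B' := PySem.List.sorted B (fun x => x) false
  let s := (A'.zip B').foldl (fun acc p => acc + (p.2 - p.1)) 0
  let rounds := PySem.Int.floordiv K s
  let remainder := PySem.Int.mod K s
  if remainder = 0 then (PySem.List.pyGet? B' (-1)).getD 0 + (rounds - 1) * C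
  else pvLoopA C rounds (A'.zip B') remainder

-- ===== PORT B =====
-- '_search(d, lo, hi, r)': divide and conquer over d[lo:hi]; every call has
-- lo < hi ≤ len d, so 'd.getD lo 0' is Python's in-range 'd[lo]'.  The 'fuel'
-- parameter (= segment length at the top call) is only a structural-termination
-- guard: each recursive segment is strictly shorter, so fuel never runs out.
def pvSearchGo (d : List Int) : Nat → Nat → Nat → Int → Int × Option (Nat × Int)
  | 0, lo, _hi, r =>
    let s := d.getD lo 0
    (s, if r ≤ s then some (lo, s) else none)
  | fuel + 1, lo, hi, r =>
    if hi - lo ≤ 1 then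
      let s := d.getD lo 0
      (s, if r ≤ s then some (lo, s) else none)
    else
      let mid := (lo + hi) / 2
      let L := pvSearchGo d fuel lo mid r
      let R := pvSearchGo d fuel mid hi (r - L.1)
      match L.2 with
      | some h => (L.1 + R.1, some h)
      | none =>
        match R.2 with
        | some (i, p) => (L.1 + R.1, some (i, L.1 + p))
        | none => (L.1 + R.1, none)

def pvSearch (d : List Int) (lo hi : Nat) (r : Int) : Int × Option (Nat × Int) :=
  pvSearchGo d (hi - lo) lo hi r

def getSecondsElapsed_alt (C : Int) (N : Int) (A : List Int) (B : List Int) (K : Int) : Int :=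
  let A' := PySem.List.sorted A (fun x => x) false
  let B' := PySem.List.sorted B (fun x => x) false
  let d := (A'.zip B').map (fun p => p.2 - p.1)
  let total := d.sum
  let rounds := PySem.Int.floordiv K total
  let remainder := PySem.Int.mod K total
  if remainder = 0 then (PySem.List.pyGet? B' (-1)).getD 0 + (rounds - 1) * C
  else
    -- 'i, p = hit' (0 stands for the TypeError on hit = None; Pre_ excludes that)
    match (pvSearch d 0 d.length remainder).2 with
    | some (i, p) => rounds * C + B'.getD i 0 + (remainder - p)
    | none => 0

-- ===== PRECONDITION & SPEC =====
-- Pre_ excludes exactly the inputs where Python A does not return an int: total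
-- paired duration 0 (ZeroDivisionError) or a nonzero remainder never reached by any
-- cumulative prefix of the per-pair durations (A falls off the loop returning None).
def Pre_getSecondsElapsed (C : Int) (N : Int) (A : List Int) (B : List Int) (K : Int) : Prop :=
  let d := ((PySem.List.sorted A (fun x => x) false).zip (PySem.List.sorted B (fun x => x) false)).map (fun p => p.2 - p.1)
  d.sum ≠ 0 ∧ (PySem.Int.mod K d.sum = 0 ∨ ∃ n : Fin d.length, PySem.Int.mod K d.sum ≤ (d.take (n.1 + 1)).sum)
instance (C : Int) (N : Int) (A : List Int) (B : List Int) (K : Int) : Decidable (Pre_getSecondsElapsed C N A B K) := by unfold Pre_getSecondsElapsed; infer_instance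

def pvWitness_getSecondsElapsed : Int × Int × List Int × List Int × Int := (10, 1, [0], [5], 7)

def Spec_getSecondsElapsed (C : Int) (N : Int) (A : List Int) (B : List Int) (K : Int) (out : Int) : Prop := out = getSecondsElapsed_alt C N A B K
instance (C : Int) (N : Int) (A : List Int) (B : List Int) (K : Int) (out : Int) : Decidable (Spec_getSecondsElapsed C N A B K out) := by unfold Spec_getSecondsElapsed; infer_instance

-- ===== CLAIM (what is proved, stated in full; the proofs are below) =====
def Claim_equal_getSecondsElapsed : Prop := ∀ (C : Int) (N : Int) (A : List Int) (B : List Int) (K : Int), Dom_getSecondsElapsed C N A B K → Pre_getSecondsElapsed C N A B K → Spec_getSecondsElapsed C N A B K (getSecondsElapsed C N A B K)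

-- ===== LEMMAS AND PROOFS =====

-- reference linear search: first index (relative) whose cumulative sum reaches r,
-- with that cumulative sum
def pvHit : List Int → Int → Option (Nat × Int)
  | [], _ => none
  | x :: t, r =>
    if r ≤ x then some (0, x)
    else match pvHit t (r - x) with
      | some (i, p) => some (i + 1, x + p)
      | none => none

theorem pvHit_lt (l : List Int) : ∀ (r : Int) (i : Nat) (p : Int),
    pvHit l r = some (i, p) → i < l.length := by
  induction l with
  | nil => intro r i p h; simp [pvHit] at h
  | cons x t ih =>
    intro r i p h
    simp only [pvHit] at h
    split_ifs at h with hx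
    · simp only [Option.some.injEq, Prod.mk.injEq] at h
      obtain ⟨h1, h2⟩ := h
      simp [List.length_cons]
      omega
    · cases hm : pvHit t (r - x) with
      | none => rw [hm] at h; exact absurd h (by simp)
      | some q =>
        obtain ⟨j, q2⟩ := q
        rw [hm] at h
        have hj := ih (r - x) j q2 hm
        have : j + 1 = i := (Prod.mk.inj (Option.some.inj h)).1
        simp [List.length_cons]
        omega

theorem pvHit_append (s1 s2 : List Int) : ∀ (r : Int),
    pvHit (s1 ++ s2) r
      = match pvHit s1 r with
        | some h => some h
        | none => (pvHit s2 (r - s1.sum)).map (fun x => (x.1 + s1.length, s1.sum + x.2)) := by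
  induction s1 with
  | nil => intro r; simp [pvHit]
  | cons x t ih =>
    intro r
    simp only [List.cons_append, pvHit]
    by_cases hx : r ≤ x
    · simp [hx]
    · simp only [if_neg hx]
      rw [ih (r - x)]
      cases hm : pvHit t (r - x) with
      | some q => simp
      | none =>
        simp only
        have harg : r - x - t.sum = r - (x :: t).sum := by simp [List.sum_cons]; ring
        rw [harg]
        cases hm2 : pvHit s2 (r - (x :: t).sum) with
        | none => simp
        | some q =>
          obtain ⟨i, p⟩ := q
          simp only [Option.map_some]
          refine congrArg some (Prod.ext ?_ ?_)
          · simp [List.length_cons]; omega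
          · simp [List.sum_cons]; ring

theorem foldl_sub_sum (ps : List (Int × Int)) : ∀ (acc : Int),
    ps.foldl (fun acc p => acc + (p.2 - p.1)) acc = acc + (ps.map (fun p => p.2 - p.1)).sum := by
  induction ps with
  | nil => intro acc; simp
  | cons hd t ih => intro acc; simp [List.foldl_cons, ih]; ring

theorem pvLoopA_eq_hit (C r : Int) (ps : List (Int × Int)) : ∀ (rem : Int),
    pvLoopA C r ps rem
      = match pvHit (ps.map (fun p => p.2 - p.1)) rem with
        | some (i, p) => r * C + (ps.getD i (0, 0)).2 + (rem - p)
        | none => 0 := by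
  induction ps with
  | nil => intro rem; simp [pvLoopA, pvHit]
  | cons hd t ih =>
    intro rem
    obtain ⟨a, b⟩ := hd
    simp only [pvLoopA, List.map_cons, pvHit]
    by_cases h : rem - (b - a) ≤ 0
    · have hc : rem ≤ b - a := by omega
      simp [h, hc]
      try ring
    · have hc : ¬ (rem ≤ b - a) := by omega
      simp only [if_neg h, if_neg hc]
      rw [ih (rem - (b - a))]
      cases hm : pvHit (t.map (fun p => p.2 - p.1)) (rem - (b - a)) with
      | none => simp
      | some q =>
        obtain ⟨i, p⟩ := q
        simp
        ring

theorem pvSearchGo_spec (d : List Int) : ∀ (fuel : Nat), ∀ (lo hi : Nat) (r : Int),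
    hi - lo ≤ fuel → lo < hi → hi ≤ d.length →
    pvSearchGo d fuel lo hi r
      = (((d.drop lo).take (hi - lo)).sum,
         (pvHit ((d.drop lo).take (hi - lo)) r).map (fun x => (lo + x.1, x.2))) := by
  intro fuel
  induction fuel with
  | zero => intro lo hi r hf hlt hle; omega
  | succ f ih =>
    intro lo hi r hf hlt hle
    simp only [pvSearchGo]
    by_cases hbase : hi - lo ≤ 1
    · have hhi : hi = lo + 1 := by omega
      subst hhi
      have hlo : lo < d.length := by omega
      have hcons : d.drop lo = d[lo] :: d.drop (lo + 1) := List.drop_eq_getElem_cons hlo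
      have hdrop : (d.drop lo).take (lo + 1 - lo) = [d[lo]] := by
        rw [show lo + 1 - lo = 1 from by omega, hcons, List.take_succ_cons, List.take_zero]
      have hget : d.getD lo 0 = d[lo] := by
        simp [List.getD_eq_getElem?_getD, List.getElem?_eq_getElem hlo]
      rw [if_pos hbase, hdrop]
      simp only [hget, pvHit, List.sum_cons, List.sum_nil]
      by_cases hr : r ≤ d[lo]
      · simp [hr]
      · simp [hr]
    · rw [if_neg hbase]
      have h2 : 2 ≤ hi - lo := by omega
      set mid := (lo + hi) / 2 with hmid
      have hm1 : lo < mid := by omega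
      have hm2 : mid < hi := by omega
      set s1 := (d.drop lo).take (mid - lo) with hs1
      set s2 := (d.drop mid).take (hi - mid) with hs2
      have hdd : (d.drop lo).drop (mid - lo) = d.drop mid := by
        rw [List.drop_drop]; congr 1; omega
      have hseg : (d.drop lo).take (hi - lo) = s1 ++ s2 := by
        rw [show hi - lo = (mid - lo) + (hi - mid) from by omega, List.take_add, hdd]
      have hL := ih lo mid r (by omega) hm1 (by omega)
      have hR := ih mid hi (r - s1.sum) (by omega) hm2 hle
      rw [← hs1] at hL
      rw [← hs2] at hR
      have hlen1 : s1.length = mid - lo := by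
        rw [hs1]; simp; omega
      rw [hL]
      simp only
      rw [hR, hseg, pvHit_append]
      simp only [List.sum_append]
      cases h1 : pvHit s1 r with
      | some q => obtain ⟨i, p⟩ := q; simp
      | none =>
        simp only [Option.map_none]
        cases h2h : pvHit s2 (r - s1.sum) with
        | none => simp
        | some q =>
          obtain ⟨i, p⟩ := q
          simp only [Option.map_some]
          refine congrArg _ (congrArg some (Prod.ext ?_ ?_))
          · simp [hlen1]; omega
          · simp

theorem pvSearch_spec (d : List Int) (lo hi : Nat) (r : Int)
    (hlt : lo < hi) (hle : hi ≤ d.length) :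
    pvSearch d lo hi r
      = (((d.drop lo).take (hi - lo)).sum,
         (pvHit ((d.drop lo).take (hi - lo)) r).map (fun x => (lo + x.1, x.2))) :=
  pvSearchGo_spec d (hi - lo) lo hi r le_rfl hlt hle

theorem zip_getD_snd (A B : List Int) (i : Nat) (h : i < (A.zip B).length) :
    ((A.zip B)[i]?.getD (0, 0)).2 = B[i]?.getD 0 := by
  have hB : i < B.length := by simp [List.length_zip] at h; omega
  rw [List.getElem?_eq_getElem h, List.getElem?_eq_getElem hB]
  simp [List.getElem_zip]

-- ===== VERDICT (by name: the statement is the Claim_ definition above) =====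
theorem getSecondsElapsed_spec : Claim_equal_getSecondsElapsed := by
  intro C N A B K _ hpre
  unfold Spec_getSecondsElapsed getSecondsElapsed getSecondsElapsed_alt
  simp only
  set A' := PySem.List.sorted A (fun x => x) false with hA'
  set B' := PySem.List.sorted B (fun x => x) false with hB'
  set d := (A'.zip B').map (fun p => p.2 - p.1) with hd
  obtain ⟨hne, -⟩ := hpre
  rw [← hA', ← hB', ← hd] at hne
  rw [foldl_sub_sum, ← hd]
  simp only [zero_add]
  split_ifs with h
  · rfl
  · have hdne : d ≠ [] := by
      intro hnil
      rw [hnil] at hne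
      exact hne List.sum_nil
    have hlen : 0 < d.length := List.length_pos_iff.mpr hdne
    rw [pvLoopA_eq_hit, ← hd,
        pvSearch_spec d 0 d.length _ hlen le_rfl]
    simp only [List.drop_zero, Nat.sub_zero, List.take_length]
    cases hm : pvHit d (PySem.Int.mod K d.sum) with
    | none => rfl
    | some q =>
      obtain ⟨i, p⟩ := q
      have hi : i < d.length := pvHit_lt d _ i p hm
      have hiz : i < (A'.zip B').length := by
        simpa [hd] using hi
      simp [zip_getD_snd A' B' i hiz]
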